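-- pv_equiv track=rewrite | github.com/syncopatedGlitch/DSA | Problems/hackerrank/alternating_binary_substring.py | longestAlternatingSubstring
-- ===== SOURCE A (Python) =====
-- def longestAlternatingSubstring(s, k):
--     if not s:
--         return 0
--     if k >= len(s):
--         return len(s)
--
--     def find_max_length(start_char, s, k):
--         left = 0
--         max_length = 0
--         flips = 0
--         for right, char in enumerate(s):
--             expected = expected_char(start_char, right)
--             if char != expected:
--                 flips += 1
--             if flips >= k:
--                 while left < right and flips > k:
--                     expected = expected_char(start_char, left)
--                     if s[left] != expected:
--                         flips -= 1
--                     left += 1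
--             max_length = max(max_length, right - left + 1)
--         return max_length
--
--     def expected_char(start_char, index):
--         if start_char == "0":
--             return str(index % 2)
--         else:
--             return str((index+1)%2)
--
--     length_pattern_1 = find_max_length("0", s, k)
--     length_pattern_2 = find_max_length("1", s, k)
--     return max(length_pattern_1, length_pattern_2)
-- ===== SOURCE B (Python) =====
-- def longestAlternatingSubstring(s, k):
--     # Direct enumeration: for each start i extend j, keeping incremental
--     # mismatch counts against the two fixed alternating patterns.
--     n = len(s)
--     best = 0
--     for i in range(n):
--         c0 = 0
--         c1 = 0
--         for j in range(i, n):
--             e0 = '0' if j % 2 == 0 else '1'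
--             e1 = '1' if j % 2 == 0 else '0'
--             if s[j] != e0:
--                 c0 += 1
--             if s[j] != e1:
--                 c1 += 1
--             if min(c0, c1) <= k:
--                 best = max(best, j - i + 1)
--     return best
-- ===== Notes on version B (the rewrite author's own statement) =====
-- stated objective: simpler
-- what changed: Replaces A's two sliding-window passes (left pointer with amortized shrink, plus two early returns) by direct enumeration of all substrings, extending each start while incrementally counting mismatches against the two fixed alternating patterns.
-- intended difference: On nonempty strings with k = 0 that contain neither '0' nor '1', A returns 1 although no single character can be made alternating within 0 flips; B returns 0, the intended value. — e.g. on longestAlternatingSubstring("x", 0): A returns 1, B returns 0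
-- outside the precondition, e.g. on longestAlternatingSubstring('01', -1): A returns 1, B returns 0
import Mathlib
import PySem

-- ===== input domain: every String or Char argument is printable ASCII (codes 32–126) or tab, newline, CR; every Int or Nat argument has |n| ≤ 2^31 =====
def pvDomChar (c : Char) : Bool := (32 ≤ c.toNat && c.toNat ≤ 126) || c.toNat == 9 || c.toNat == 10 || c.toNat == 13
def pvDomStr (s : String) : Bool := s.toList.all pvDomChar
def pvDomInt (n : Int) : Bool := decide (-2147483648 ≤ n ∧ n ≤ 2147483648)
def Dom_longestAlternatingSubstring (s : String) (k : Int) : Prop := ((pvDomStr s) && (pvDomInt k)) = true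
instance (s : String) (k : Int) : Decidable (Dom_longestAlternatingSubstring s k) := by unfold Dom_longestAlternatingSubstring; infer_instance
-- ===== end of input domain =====

-- B replaces A's two sliding-window passes by direct enumeration of all substrings with
-- incremental mismatch counts against both alternating patterns (objective: simpler).

-- ===== PORT A =====
-- expected_char(start_char, index): str(index % 2) / str((index+1) % 2) rendered as the
-- single Char it denotes (exact: the value is always 0 or 1)
def pvExpectedChar (start : Char) (i : Int) : Char :=
  if start = '0' then (if PySem.Int.mod i 2 = 0 then '0' else '1')
  else (if PySem.Int.mod (i + 1) 2 = 0 then '0' else '1')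

-- the inner `while left < right and flips > k` loop of find_max_length
def pvShrink (l : List Char) (start : Char) (k : Int) (right : Int)
    (left flips : Int) : Int × Int :=
  if h : left < right ∧ k < flips then
    pvShrink l start k right (left + 1)
      (if PySem.List.pyGet? l left ≠ some (pvExpectedChar start left) then flips - 1 else flips)
  else (left, flips)
termination_by (right - left).toNat
decreasing_by omega

-- one iteration of `for right, char in enumerate(s)`; state = (left, max_length, flips)
def pvStepA (l : List Char) (start : Char) (k : Int)
    (st : Int × Int × Int) (rc : Int × Char) : Int × Int × Int :=
  let flips1 := if rc.2 ≠ pvExpectedChar start rc.1 then st.2.2 + 1 else st.2.2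
  let lf := if k ≤ flips1 then pvShrink l start k rc.1 st.1 flips1 else (st.1, flips1)
  (lf.1, max st.2.1 (rc.1 - lf.1 + 1), lf.2)

def pvFindMaxLength (start : Char) (l : List Char) (k : Int) : Int :=
  ((PySem.List.enumerate l).foldl (pvStepA l start k) (0, 0, 0)).2.1

def longestAlternatingSubstring (s : String) (k : Int) : Int :=
  if s.toList = [] then 0
  else if (s.toList.length : Int) ≤ k then (s.toList.length : Int)
  else max (pvFindMaxLength '0' s.toList k) (pvFindMaxLength '1' s.toList k)

-- ===== PORT B =====
-- inner `for j in range(i, n)`; state = (c0, c1, best)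
def pvInnerStep (l : List Char) (k : Int) (i : Int)
    (st : Int × Int × Int) (j : Int) : Int × Int × Int :=
  let e0 : Char := if PySem.Int.mod j 2 = 0 then '0' else '1'
  let e1 : Char := if PySem.Int.mod j 2 = 0 then '1' else '0'
  let c0' := if PySem.List.pyGet? l j ≠ some e0 then st.1 + 1 else st.1
  let c1' := if PySem.List.pyGet? l j ≠ some e1 then st.2.1 + 1 else st.2.1
  let best' := if min c0' c1' ≤ k then max st.2.2 (j - i + 1) else st.2.2
  (c0', c1', best')

-- outer `for i in range(n)`; accumulator = best
def pvOuterStep (l : List Char) (k : Int) (best : Int) (i : Int) : Int :=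
  ((PySem.List.pyRange i (l.length : Int) 1).foldl (pvInnerStep l k i) (0, 0, best)).2.2

def longestAlternatingSubstring_alt (s : String) (k : Int) : Int :=
  (PySem.List.pyRange 0 (s.toList.length : Int) 1).foldl (pvOuterStep s.toList k) 0

-- ===== PRECONDITION & SPEC =====
-- Pre_ restricts to the task's natural domain of nonnegative flip budgets; for k < 0
-- (a meaningless budget) A still returns 1 on nonempty strings while B returns 0.
def Pre_longestAlternatingSubstring (s : String) (k : Int) : Prop := 0 ≤ k
instance (s : String) (k : Int) : Decidable (Pre_longestAlternatingSubstring s k) := by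
  unfold Pre_longestAlternatingSubstring; infer_instance
def pvWitness_longestAlternatingSubstring : String × Int := ("0101", 1)

-- On nonempty strings with k = 0 containing neither '0' nor '1', A returns 1 although no
-- single character is alternating within 0 flips; B returns 0, the intended value.
def D_longestAlternatingSubstring (s : String) (k : Int) : Prop :=
  k = 0 ∧ s.toList ≠ [] ∧ ∀ c ∈ s.toList, c ≠ '0' ∧ c ≠ '1'
instance (s : String) (k : Int) : Decidable (D_longestAlternatingSubstring s k) := by
  unfold D_longestAlternatingSubstring; infer_instance

def Spec_longestAlternatingSubstring (s : String) (k : Int) (out : Int) : Prop :=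
  ¬ D_longestAlternatingSubstring s k → out = longestAlternatingSubstring_alt s k
instance (s : String) (k : Int) (out : Int) : Decidable (Spec_longestAlternatingSubstring s k out) := by
  unfold Spec_longestAlternatingSubstring; infer_instance

def pvDiffWitness_longestAlternatingSubstring : String × Int := ("x", 0)
def pvDiffWitnessOut_longestAlternatingSubstring : Int × Int := (1, 0)

-- ===== CLAIM (what is proved, stated in full; the proofs are below) =====
def Claim_unchanged_longestAlternatingSubstring : Prop := ∀ (s : String) (k : Int), Dom_longestAlternatingSubstring s k → Pre_longestAlternatingSubstring s k → Spec_longestAlternatingSubstring s k (longestAlternatingSubstring s k)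
def Claim_changed_longestAlternatingSubstring : Prop := Dom_longestAlternatingSubstring (pvDiffWitness_longestAlternatingSubstring.1) (pvDiffWitness_longestAlternatingSubstring.2) ∧ Pre_longestAlternatingSubstring (pvDiffWitness_longestAlternatingSubstring.1) (pvDiffWitness_longestAlternatingSubstring.2) ∧ D_longestAlternatingSubstring (pvDiffWitness_longestAlternatingSubstring.1) (pvDiffWitness_longestAlternatingSubstring.2) ∧ longestAlternatingSubstring (pvDiffWitness_longestAlternatingSubstring.1) (pvDiffWitness_longestAlternatingSubstring.2) = pvDiffWitnessOut_longestAlternatingSubstring.1 ∧ longestAlternatingSubstring_alt (pvDiffWitness_longestAlternatingSubstring.1) (pvDiffWitness_longestAlternatingSubstring.2) = pvDiffWitnessOut_longestAlternatingSubstring.2 ∧ pvDiffWitnessOut_longestAlternatingSubstring.1 ≠ pvDiffWitnessOut_longestAlternatingSubstring.2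
def Claim_exact_longestAlternatingSubstring : Prop := ∀ (s : String) (k : Int), Dom_longestAlternatingSubstring s k → Pre_longestAlternatingSubstring s k → D_longestAlternatingSubstring s k → longestAlternatingSubstring s k ≠ longestAlternatingSubstring_alt s k

-- ===== LEMMAS AND PROOFS =====
def pvExp (p : Bool) (j : Nat) : Char :=
  if j % 2 = 0 then (if p then '0' else '1') else (if p then '1' else '0')

def pvMis (l : List Char) (p : Bool) (j : Nat) : Bool := decide (l.getD j ' ' ≠ pvExp p j)

def pvCnt (l : List Char) (p : Bool) (i m : Nat) : Nat := (List.range' i m).countP (pvMis l p)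

def pvFeas (l : List Char) (k : Int) (p : Bool) (i m : Nat) : Prop :=
  i + m ≤ l.length ∧ 1 ≤ m ∧ (pvCnt l p i m : Int) ≤ k

theorem pvCnt_succ_right (l : List Char) (p : Bool) (i m : Nat) :
    pvCnt l p i (m + 1) = pvCnt l p i m + (if pvMis l p (i + m) then 1 else 0) := by
  simp [pvCnt, List.range'_concat, List.countP_append, List.countP_singleton]

theorem pvCnt_cons (l : List Char) (p : Bool) (i m : Nat) :
    pvCnt l p i (m + 1) = (if pvMis l p i then 1 else 0) + pvCnt l p (i + 1) m := by
  simp [pvCnt, List.range'_succ, List.countP_cons]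
  omega

theorem pvCnt_le (l : List Char) (p : Bool) (i m : Nat) : pvCnt l p i m ≤ m := by
  simpa [pvCnt] using List.countP_le_length (l := List.range' i m) (p := pvMis l p)

theorem pvCnt_mono (l : List Char) (p : Bool) (i m : Nat) :
    pvCnt l p i m ≤ pvCnt l p i (m + 1) := by
  rw [pvCnt_succ_right]; omega

theorem pvExpectedChar_eq (p : Bool) (j : Nat) :
    pvExpectedChar (if p then '0' else '1') (j : Int) = pvExp p j := by
  have m0 : PySem.Int.mod (↑j) 2 = ((j % 2 : Nat) : Int) := PySem.Int.mod_natCast j 2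
  have m1 : PySem.Int.mod ((j : Int) + 1) 2 = (((j + 1) % 2 : Nat) : Int) := by
    have h1 : ((j : Int) + 1) = ((j + 1 : Nat) : Int) := by push_cast; ring
    rw [h1]; exact PySem.Int.mod_natCast (j + 1) 2
  unfold pvExpectedChar pvExp
  rw [m0, m1]
  cases p <;> by_cases h : j % 2 = 0
  · have h2 : (j + 1) % 2 = 1 := by omega
    simp [h2, h]
  · have h2 : (j + 1) % 2 = 0 := by omega
    simp [h2, h]
  · simp [h]
  · have h2 : j % 2 = 1 := by omega
    simp [h2, h]

theorem pvGet_eq (l : List Char) (j : Nat) (hj : j < l.length) :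
    PySem.List.pyGet? l (j : Int) = some (l.getD j ' ') := by
  rw [PySem.List.pyGet?_natCast, List.getElem?_eq_getElem hj, List.getD_eq_getElem?_getD,
    List.getElem?_eq_getElem hj]
  rfl

theorem pvMis_iff (l : List Char) (p : Bool) (j : Nat) (hj : j < l.length) :
    (PySem.List.pyGet? l (j : Int) ≠ some (pvExp p j)) ↔ pvMis l p j = true := by
  rw [pvGet_eq l j hj]; simp [pvMis]
theorem pvShrink_spec (l : List Char) (p : Bool) (k : Int) (r : Nat) (hr : r < l.length) :
    ∀ (L : Nat), L ≤ r →
    ∃ L' : Nat, L ≤ L' ∧ L' ≤ r ∧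
      pvShrink l (if p then '0' else '1') k (r : Int) (L : Int)
          ((pvCnt l p L (r + 1 - L) : Nat) : Int)
        = ((L' : Int), ((pvCnt l p L' (r + 1 - L') : Nat) : Int)) ∧
      (∀ L'' : Nat, L ≤ L'' → L'' < L' → k < ((pvCnt l p L'' (r + 1 - L'') : Nat) : Int)) ∧
      (((pvCnt l p L' (r + 1 - L') : Nat) : Int) ≤ k ∨ L' = r) := by
  intro L hL
  induction hd : r - L generalizing L with
  | zero =>
    -- L = r: guard false since ¬(L < r)
    have hLr : L = r := by omega
    refine ⟨L, le_refl _, hL, ?_, by omega, Or.inr hLr⟩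
    rw [pvShrink]
    simp only [dif_neg (by omega : ¬((L : Int) < (r : Int) ∧ k < ((pvCnt l p L (r + 1 - L) : Nat) : Int)))]
  | succ d ih =>
    by_cases hg : k < ((pvCnt l p L (r + 1 - L) : Nat) : Int)
    · -- guard true: one unfolding step
      have hLr : L < r := by omega
      have hsplit : pvCnt l p L (r + 1 - L) = (if pvMis l p L then 1 else 0) + pvCnt l p (L + 1) (r - L) := by
        have : r + 1 - L = (r - L) + 1 := by omega
        rw [this, pvCnt_cons]
      have hnext : r + 1 - (L + 1) = r - L := by omega
      obtain ⟨L', h1, h2, h3, h4, h5⟩ := ih (L + 1) (by omega) (by omega)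
      refine ⟨L', by omega, h2, ?_, ?_, h5⟩
      · rw [pvShrink]
        rw [dif_pos ⟨by exact_mod_cast hLr, hg⟩]
        rw [pvExpectedChar_eq p L]
        rw [show ((L : Int) + 1) = ((L + 1 : Nat) : Int) by push_cast; ring]
        by_cases hm : pvMis l p L = true
        · rw [if_pos ((pvMis_iff l p L (by omega)).mpr hm)]
          have heq : ((pvCnt l p L (r + 1 - L) : Nat) : Int) - 1
              = ((pvCnt l p (L + 1) (r + 1 - (L + 1)) : Nat) : Int) := by
            rw [hsplit, hnext, if_pos hm]; push_cast; ring
          rw [heq]; exact h3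
        · rw [if_neg (fun hc2 => hm ((pvMis_iff l p L (by omega)).mp hc2))]
          have heq : ((pvCnt l p L (r + 1 - L) : Nat) : Int)
              = ((pvCnt l p (L + 1) (r + 1 - (L + 1)) : Nat) : Int) := by
            rw [hsplit, hnext, if_neg hm]; push_cast; ring
          rw [heq]; exact h3
      · intro L'' hL1 hL2
        rcases Nat.eq_or_lt_of_le hL1 with he | hlt
        · rw [← he]; exact hg
        · exact h4 L'' hlt hL2
    · -- guard false: stop here
      refine ⟨L, le_refl _, hL, ?_, by omega, Or.inl (by omega)⟩
      rw [pvShrink]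
      simp only [dif_neg (by omega : ¬((L : Int) < (r : Int) ∧ k < ((pvCnt l p L (r + 1 - L) : Nat) : Int)))]
theorem pvGetD_eq (l : List Char) (r : Nat) (hr : r < l.length) : l.getD r ' ' = l[r] := by
  rw [List.getD_eq_getElem?_getD, List.getElem?_eq_getElem hr]; rfl

theorem pvLoop_inv (l : List Char) (p : Bool) (k : Int) :
    ∀ r : Nat, r ≤ l.length →
    ∃ (L : Nat) (ml : Int),
      ((PySem.List.enumerate l).take r).foldl (pvStepA l (if p then '0' else '1') k) (0, 0, 0)
        = ((L : Int), ml, ((pvCnt l p L (r - L) : Nat) : Int)) ∧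
      L ≤ r ∧ (0 < r → L < r) ∧
      (∀ L' : Nat, L' < L → k < ((pvCnt l p L' (r - L') : Nat) : Int)) ∧
      0 ≤ ml ∧
      ((ml = 0 ∧ r = 0) ∨ ml = 1 ∨ ∃ i m : Nat, pvFeas l k p i m ∧ i + m ≤ r ∧ ml = (m : Int)) ∧
      (∀ i m : Nat, pvFeas l k p i m → i + m ≤ r → (m : Int) ≤ ml) := by
  intro r
  induction r with
  | zero =>
    intro _
    exact ⟨0, 0, by simp [pvCnt], by omega, by omega, by omega, by omega, Or.inl ⟨rfl, rfl⟩,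
      by intro i m hf him; omega⟩
  | succ r ih =>
    intro hr1
    have hr : r < l.length := by omega
    obtain ⟨L, ml, hfold, hL, hLlt, hmin, hml0, hshape, hub⟩ := ih (by omega)
    -- unfold one step of the loop
    have htake : (PySem.List.enumerate l).take (r + 1)
        = (PySem.List.enumerate l).take r ++ [((r : Int), l[r])] := by
      rw [List.take_succ]
      congr 1
      rw [PySem.List.getElem?_enumerate]
      simp [List.getElem?_eq_getElem hr]
    rw [htake, List.foldl_append, hfold]
    simp only [List.foldl_cons, List.foldl_nil]
    -- the body of pvStepA on our state
    have hmisr : (l[r] ≠ pvExp p r) ↔ pvMis l p r = true := by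
      simp [pvMis, List.getD_eq_getElem?_getD, List.getElem?_eq_getElem hr]
    have hflips1 : (if l[r] ≠ pvExpectedChar (if p then '0' else '1') ((r : Int))
          then ((pvCnt l p L (r - L) : Nat) : Int) + 1 else ((pvCnt l p L (r - L) : Nat) : Int))
        = ((pvCnt l p L (r + 1 - L) : Nat) : Int) := by
      rw [pvExpectedChar_eq p r]
      rw [show r + 1 - L = (r - L) + 1 by omega, pvCnt_succ_right,
        show L + (r - L) = r by omega]
      by_cases hm : pvMis l p r = true
      · rw [if_pos (hmisr.mpr hm), if_pos hm]; push_cast; ring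
      · rw [if_neg (fun hc => hm (hmisr.mp hc)), if_neg (by simpa using hm)]; push_cast; ring
    simp only [pvStepA]
    rw [hflips1]
    -- the shrink (or not) step
    have hmain : ∃ L' : Nat, L ≤ L' ∧ L' ≤ r ∧
        (if k ≤ ((pvCnt l p L (r + 1 - L) : Nat) : Int)
          then pvShrink l (if p then '0' else '1') k ((r : Int)) ((L : Int)) ((pvCnt l p L (r + 1 - L) : Nat) : Int)
          else (((L : Int)), ((pvCnt l p L (r + 1 - L) : Nat) : Int)))
          = ((L' : Int), ((pvCnt l p L' (r + 1 - L') : Nat) : Int)) ∧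
        (∀ L'' : Nat, L ≤ L'' → L'' < L' → k < ((pvCnt l p L'' (r + 1 - L'') : Nat) : Int)) ∧
        (((pvCnt l p L' (r + 1 - L') : Nat) : Int) ≤ k ∨ L' = r) := by
      by_cases hbr : k ≤ ((pvCnt l p L (r + 1 - L) : Nat) : Int)
      · obtain ⟨L', h1, h2, h3, h4, h5⟩ := pvShrink_spec l p k r hr L hL
        exact ⟨L', h1, h2, by rw [if_pos hbr]; exact h3, h4, h5⟩
      · exact ⟨L, le_refl _, hL, by rw [if_neg hbr], by omega, Or.inl (by omega)⟩
    obtain ⟨L', hLL', hL'r, hstep, hskip, hdisj⟩ := hmain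
    rw [hstep]
    -- new minimality
    have hmin' : ∀ L'' : Nat, L'' < L' → k < ((pvCnt l p L'' (r + 1 - L'') : Nat) : Int) := by
      intro L'' hlt
      by_cases hc : L'' < L
      · have h1 := hmin L'' hc
        have h2 : pvCnt l p L'' (r - L'') ≤ pvCnt l p L'' (r + 1 - L'') := by
          rw [show r + 1 - L'' = (r - L'') + 1 by omega]
          exact pvCnt_mono l p L'' (r - L'')
        have : ((pvCnt l p L'' (r - L'') : Nat) : Int) ≤ ((pvCnt l p L'' (r + 1 - L'') : Nat) : Int) := by
          exact_mod_cast h2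
        omega
      · exact hskip L'' (by omega) hlt
    -- the recorded window length
    set m' : Nat := r + 1 - L' with hm'
    have hrec : ((r : Int)) - ((L' : Int)) + 1 = ((m' : Nat) : Int) := by
      rw [hm']; push_cast; omega
    rw [hrec]
    have hm'1 : 1 ≤ m' := by omega
    refine ⟨L', max ml ((m' : Nat) : Int), rfl, by omega, by omega, hmin', by positivity, ?_, ?_⟩
    · -- shape of the new max_length
      by_cases hfeas : ((pvCnt l p L' m' : Nat) : Int) ≤ k
      · have hwin : pvFeas l k p L' m' := ⟨by omega, hm'1, hfeas⟩
        rcases le_total ml ((m' : Nat) : Int) with hle | hle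
        · rw [max_eq_right hle]
          exact Or.inr (Or.inr ⟨L', m', hwin, by omega, rfl⟩)
        · rw [max_eq_left hle]
          rcases hshape with ⟨h0, _⟩ | h1 | ⟨i, m, hf, him, hme⟩
          · exfalso; rw [h0] at hle; omega
          · exact Or.inr (Or.inl h1)
          · exact Or.inr (Or.inr ⟨i, m, hf, by omega, hme⟩)
      · have hL'r2 : L' = r := by tauto
        have hm'eq : m' = 1 := by omega
        rcases le_total ml ((m' : Nat) : Int) with hle | hle
        · rw [max_eq_right hle, hm'eq]
          exact Or.inr (Or.inl (by norm_num))
        · rw [max_eq_left hle]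
          rcases hshape with ⟨h0, _⟩ | h1 | ⟨i, m, hf, him, hme⟩
          · exfalso; rw [h0, hm'eq] at hle; norm_num at hle
          · exact Or.inr (Or.inl h1)
          · exact Or.inr (Or.inr ⟨i, m, hf, by omega, hme⟩)
    · -- upper bound on all feasible windows ending by r+1
      intro i m hf him
      by_cases hc : i + m ≤ r
      · have := hub i m hf hc
        exact le_trans this (le_max_left _ _)
      · have hend : i + m = r + 1 := by omega
        have hiL' : L' ≤ i := by
          by_contra hcon
          have := hmin' i (by omega)
          have hmi : r + 1 - i = m := by omega
          rw [hmi] at this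
          have := hf.2.2
          omega
        have : (m : Int) ≤ ((m' : Nat) : Int) := by
          have : m ≤ m' := by omega
          exact_mod_cast this
        exact le_trans this (le_max_right _ _)
theorem pvFind_spec (l : List Char) (p : Bool) (k : Int) (hne : l ≠ []) :
    (pvFindMaxLength (if p then '0' else '1') l k = 1 ∨
      ∃ i m : Nat, pvFeas l k p i m ∧ pvFindMaxLength (if p then '0' else '1') l k = (m : Int)) ∧
    (∀ i m : Nat, pvFeas l k p i m → (m : Int) ≤ pvFindMaxLength (if p then '0' else '1') l k) := by
  obtain ⟨L, ml, hfold, _, _, _, _, hshape, hub⟩ := pvLoop_inv l p k l.length (le_refl _)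
  have htake : (PySem.List.enumerate l).take l.length = PySem.List.enumerate l := by
    rw [← PySem.List.length_enumerate (xs := l) (s := 0), List.take_length]
  rw [htake] at hfold
  have hval : pvFindMaxLength (if p then '0' else '1') l k = ml := by
    unfold pvFindMaxLength; rw [hfold]
  have hlen : 0 < l.length := List.length_pos_iff.mpr hne
  constructor
  · rcases hshape with ⟨_, h0⟩ | h1 | ⟨i, m, hf, _, hme⟩
    · omega
    · exact Or.inl (by omega)
    · exact Or.inr ⟨i, m, hf, by omega⟩
  · intro i m hf
    have := hub i m hf hf.1
    omega
theorem pvE0 (u : Nat) : (if PySem.Int.mod (u : Int) 2 = 0 then '0' else '1') = pvExp true u := by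
  rw [show (2 : Int) = ((2 : Nat) : Int) from rfl, PySem.Int.mod_natCast u 2]
  by_cases h : u % 2 = 0 <;> simp [pvExp, h] <;> omega

theorem pvE1 (u : Nat) : (if PySem.Int.mod (u : Int) 2 = 0 then '1' else '0') = pvExp false u := by
  rw [show (2 : Int) = ((2 : Nat) : Int) from rfl, PySem.Int.mod_natCast u 2]
  by_cases h : u % 2 = 0 <;> simp [pvExp, h] <;> omega

theorem pvInner_inv (l : List Char) (k : Int) (i : Nat) (b0 : Int) :
    ∀ u : Nat, u ≤ l.length →
    ∃ best : Int,
      (PySem.List.pyRange (i : Int) (u : Int) 1).foldl (pvInnerStep l k (i : Int)) (0, 0, b0)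
        = (((pvCnt l true i (u - i) : Nat) : Int), ((pvCnt l false i (u - i) : Nat) : Int), best) ∧
      b0 ≤ best ∧
      (best = b0 ∨ ∃ (p : Bool) (m : Nat), pvFeas l k p i m ∧ best = (m : Int)) ∧
      (∀ (p : Bool) (m : Nat), pvFeas l k p i m → i + m ≤ u → (m : Int) ≤ best) := by
  intro u
  induction u with
  | zero =>
    intro _
    refine ⟨b0, ?_, le_refl _, Or.inl rfl, by intro p m hf him; have := hf.2.1; omega⟩
    rw [PySem.List.pyRange_one_eq_nil (by omega)]
    simp [pvCnt]
  | succ u ihu =>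
    intro hu1
    by_cases hiu : i ≤ u
    · have hu : u < l.length := by omega
      obtain ⟨best, hfold, hb0, hshape, hub⟩ := ihu (by omega)
      have hsplit : PySem.List.pyRange (i : Int) ((u + 1 : Nat) : Int) 1
          = PySem.List.pyRange (i : Int) (u : Int) 1 ++ [(u : Int)] := by
        rw [show ((u + 1 : Nat) : Int) = (u : Int) + 1 by push_cast; ring]
        exact PySem.List.pyRange_one_succ_right (by exact_mod_cast hiu)
      rw [hsplit, List.foldl_append, hfold]
      simp only [List.foldl_cons, List.foldl_nil, pvInnerStep]
      rw [pvE0, pvE1]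
      have hmis0 : (PySem.List.pyGet? l (u : Int) ≠ some (pvExp true u)) ↔ pvMis l true u = true :=
        pvMis_iff l true u hu
      have hmis1 : (PySem.List.pyGet? l (u : Int) ≠ some (pvExp false u)) ↔ pvMis l false u = true :=
        pvMis_iff l false u hu
      have hcnt : ∀ p : Bool,
          (if PySem.List.pyGet? l (u : Int) ≠ some (pvExp p u)
            then ((pvCnt l p i (u - i) : Nat) : Int) + 1 else ((pvCnt l p i (u - i) : Nat) : Int))
          = ((pvCnt l p i (u + 1 - i) : Nat) : Int) := by
        intro p
        have hmis : (PySem.List.pyGet? l (u : Int) ≠ some (pvExp p u)) ↔ pvMis l p u = true :=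
          pvMis_iff l p u hu
        rw [show u + 1 - i = (u - i) + 1 by omega, pvCnt_succ_right,
          show i + (u - i) = u by omega]
        by_cases hm : pvMis l p u = true
        · rw [if_pos (hmis.mpr hm), if_pos hm]; push_cast; ring
        · rw [if_neg (fun hc => hm (hmis.mp hc)), if_neg (by simpa using hm)]; push_cast; ring
      rw [hcnt true, hcnt false]
      set m' : Nat := u + 1 - i with hm'
      have hrec : ((u : Int)) - ((i : Int)) + 1 = ((m' : Nat) : Int) := by push_cast; omega
      rw [hrec]
      by_cases hbr : min ((pvCnt l true i m' : Nat) : Int) ((pvCnt l false i m' : Nat) : Int) ≤ k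
      · rw [if_pos hbr]
        have hwin : ∃ p : Bool, pvFeas l k p i m' := by
          rcases min_le_iff.mp hbr with hc | hc
          · exact ⟨true, by omega, by omega, hc⟩
          · exact ⟨false, by omega, by omega, hc⟩
        obtain ⟨p0, hwin⟩ := hwin
        refine ⟨max best ((m' : Nat) : Int), rfl, le_trans hb0 (le_max_left _ _), ?_, ?_⟩
        · rcases le_total best ((m' : Nat) : Int) with hle | hle
          · rw [max_eq_right hle]; exact Or.inr ⟨p0, m', hwin, rfl⟩
          · rw [max_eq_left hle]; exact hshape
        · intro p m hf him
          by_cases hc : i + m ≤ u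
          · exact le_trans (hub p m hf hc) (le_max_left _ _)
          · have : m = m' := by omega
            rw [this]; exact le_max_right _ _
      · rw [if_neg hbr]
        refine ⟨best, rfl, hb0, hshape, ?_⟩
        intro p m hf him
        by_cases hc : i + m ≤ u
        · exact hub p m hf hc
        · exfalso
          have hmm : m = m' := by omega
          have := hf.2.2
          rw [hmm] at this
          rcases p with _ | _
          · exact hbr (le_trans (min_le_right _ _) this)
          · exact hbr (le_trans (min_le_left _ _) this)
    · -- i = u + 1 : empty range
      have hie : (i : Int) ≥ ((u + 1 : Nat) : Int) := by exact_mod_cast (by omega : u + 1 ≤ i)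
      refine ⟨b0, ?_, le_refl _, Or.inl rfl, by intro p m hf him; have := hf.2.1; omega⟩
      rw [PySem.List.pyRange_one_eq_nil (by omega)]
      simp [pvCnt, show u + 1 - i = 0 by omega]
theorem pvOuter_inv (l : List Char) (k : Int) :
    ∀ t : Nat, t ≤ l.length →
    ∃ b : Int,
      (PySem.List.pyRange 0 (t : Int) 1).foldl (pvOuterStep l k) 0 = b ∧
      0 ≤ b ∧
      (b = 0 ∨ ∃ (p : Bool) (i m : Nat), pvFeas l k p i m ∧ b = (m : Int)) ∧
      (∀ (p : Bool) (i m : Nat), pvFeas l k p i m → i < t → (m : Int) ≤ b) := by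
  intro t
  induction t with
  | zero =>
    intro _
    exact ⟨0, by rw [PySem.List.pyRange_one_eq_nil (by omega)]; rfl, le_refl _, Or.inl rfl,
      by intro p i m hf hit; omega⟩
  | succ t iht =>
    intro ht1
    obtain ⟨b, hfold, hb0, hshape, hub⟩ := iht (by omega)
    have hsplit : PySem.List.pyRange 0 ((t + 1 : Nat) : Int) 1
        = PySem.List.pyRange 0 (t : Int) 1 ++ [(t : Int)] := by
      rw [show ((t + 1 : Nat) : Int) = (t : Int) + 1 by push_cast; ring]
      exact PySem.List.pyRange_one_succ_right (by exact_mod_cast (Nat.zero_le t))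
    rw [hsplit, List.foldl_append, hfold]
    simp only [List.foldl_cons, List.foldl_nil]
    obtain ⟨best, hifold, hib0, hishape, hiub⟩ := pvInner_inv l k t b l.length (le_refl _)
    have houter : pvOuterStep l k b (t : Int) = best := by
      unfold pvOuterStep; rw [hifold]
    rw [houter]
    refine ⟨best, rfl, le_trans hb0 hib0, ?_, ?_⟩
    · rcases hishape with he | ⟨p, m, hf, hme⟩
      · rw [he]; exact hshape
      · exact Or.inr ⟨p, t, m, hf, hme⟩
    · intro p i m hf hit
      by_cases hc : i < t
      · exact le_trans (hub p i m hf hc) hib0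
      · have : i = t := by omega
        subst this
        exact hiub p m hf hf.1
theorem pvAlt_spec (s : String) (k : Int) :
    0 ≤ longestAlternatingSubstring_alt s k ∧
    (longestAlternatingSubstring_alt s k = 0 ∨
      ∃ (p : Bool) (i m : Nat), pvFeas s.toList k p i m ∧
        longestAlternatingSubstring_alt s k = (m : Int)) ∧
    (∀ (p : Bool) (i m : Nat), pvFeas s.toList k p i m →
      (m : Int) ≤ longestAlternatingSubstring_alt s k) := by
  obtain ⟨b, hfold, h0, hs, hub⟩ := pvOuter_inv s.toList k s.toList.length (le_refl _)
  have hval : longestAlternatingSubstring_alt s k = b := by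
    unfold longestAlternatingSubstring_alt; exact hfold
  refine ⟨by omega, ?_, ?_⟩
  · rcases hs with he | ⟨p, i, m, hf, hme⟩
    · exact Or.inl (by omega)
    · exact Or.inr ⟨p, i, m, hf, by omega⟩
  · intro p i m hf
    have := hub p i m hf (by have := hf.1; have := hf.2.1; omega)
    omega

theorem pvCnt_singleton (l : List Char) (p : Bool) (j : Nat) :
    pvCnt l p j 1 = if pvMis l p j then 1 else 0 := by
  simp [pvCnt, List.range'_one, List.countP_singleton]

theorem pvExp_pair (j : Nat) :
    (pvExp true j = '0' ∧ pvExp false j = '1') ∨ (pvExp true j = '1' ∧ pvExp false j = '0') := by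
  unfold pvExp; split <;> simp

theorem pvFeas_singleton (l : List Char) (k : Int) (hne : l ≠ []) (hk : 0 ≤ k)
    (h : k ≠ 0 ∨ ∃ c ∈ l, c = '0' ∨ c = '1') :
    ∃ (p : Bool) (i : Nat), pvFeas l k p i 1 := by
  have hlen : 0 < l.length := List.length_pos_iff.mpr hne
  rcases h with hk1 | ⟨c, hc, hbin⟩
  · refine ⟨true, 0, by omega, le_refl _, ?_⟩
    have := pvCnt_le l true 0 1
    have : ((pvCnt l true 0 1 : Nat) : Int) ≤ 1 := by exact_mod_cast this
    omega
  · obtain ⟨j, hj, hlj⟩ := List.mem_iff_getElem.mp hc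
    have hgd : l.getD j ' ' = c := by rw [pvGetD_eq l j hj, hlj]
    have : ∃ p : Bool, pvExp p j = c := by
      rcases pvExp_pair j with ⟨h0, h1⟩ | ⟨h0, h1⟩ <;> rcases hbin with hb | hb
      · exact ⟨true, by rw [h0, hb]⟩
      · exact ⟨false, by rw [h1, hb]⟩
      · exact ⟨false, by rw [h1, hb]⟩
      · exact ⟨true, by rw [h0, hb]⟩
    obtain ⟨p, hp⟩ := this
    refine ⟨p, j, by omega, le_refl _, ?_⟩
    have hmisf : pvMis l p j = false := by
      unfold pvMis; rw [hgd, hp]; simp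
    rw [pvCnt_singleton, if_neg (by simp [hmisf])]
    omega

theorem pvNoFeas (l : List Char) (hall : ∀ c ∈ l, c ≠ '0' ∧ c ≠ '1') :
    ∀ (p : Bool) (i m : Nat), ¬ pvFeas l 0 p i m := by
  rintro p i m ⟨hlen, hm, hcnt⟩
  have hfull : pvCnt l p i m = m := by
    unfold pvCnt
    rw [List.countP_eq_length.mpr, List.length_range']
    intro j hj
    have hjr := List.mem_range'.mp hj
    have hjl : j < l.length := by omega
    have hmem : l[j] ∈ l := List.getElem_mem hjl
    have := hall l[j] hmem
    have hne : l.getD j ' ' ≠ pvExp p j := by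
      rw [pvGetD_eq l j hjl]
      rcases pvExp_pair j with ⟨h0, _⟩ | ⟨h0, _⟩ <;> cases p <;> simp_all
    simpa [pvMis] using hne
  rw [hfull] at hcnt
  omega
theorem pvMainEq (s : String) (k : Int) (hpre : 0 ≤ k)
    (hnd : ¬ (k = 0 ∧ s.toList ≠ [] ∧ ∀ c ∈ s.toList, c ≠ '0' ∧ c ≠ '1')) :
    longestAlternatingSubstring s k = longestAlternatingSubstring_alt s k := by
  unfold longestAlternatingSubstring
  obtain ⟨halt0, haltshape, haltub⟩ := pvAlt_spec s k
  by_cases hl : s.toList = []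
  · rw [if_pos hl]
    rcases haltshape with he | ⟨p, i, m, hf, hme⟩
    · omega
    · exfalso
      have h1 := hf.1
      have h2 := hf.2.1
      rw [hl] at h1
      simp at h1
      omega
  · rw [if_neg hl]
    have hlen : 0 < s.toList.length := List.length_pos_iff.mpr hl
    by_cases hk : ((s.toList.length : Nat) : Int) ≤ k
    · rw [if_pos hk]
      have hcle : ((pvCnt s.toList true 0 s.toList.length : Nat) : Int)
          ≤ ((s.toList.length : Nat) : Int) := by
        exact_mod_cast pvCnt_le s.toList true 0 s.toList.length
      have hfull : pvFeas s.toList k true 0 s.toList.length := ⟨by omega, by omega, by omega⟩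
      have hge := haltub true 0 _ hfull
      rcases haltshape with he | ⟨p, i, m, hf, hme⟩
      · omega
      · have hmle : m ≤ s.toList.length := by have := hf.1; omega
        have hmle' : ((m : Nat) : Int) ≤ ((s.toList.length : Nat) : Int) := by exact_mod_cast hmle
        omega
    · rw [if_neg hk]
      obtain ⟨hsh0, hub0⟩ : (pvFindMaxLength '0' s.toList k = 1 ∨
            ∃ i m : Nat, pvFeas s.toList k true i m ∧
              pvFindMaxLength '0' s.toList k = (m : Int)) ∧
          (∀ i m : Nat, pvFeas s.toList k true i m →
            (m : Int) ≤ pvFindMaxLength '0' s.toList k) := pvFind_spec s.toList true k hl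
      obtain ⟨hsh1, hub1⟩ : (pvFindMaxLength '1' s.toList k = 1 ∨
            ∃ i m : Nat, pvFeas s.toList k false i m ∧
              pvFindMaxLength '1' s.toList k = (m : Int)) ∧
          (∀ i m : Nat, pvFeas s.toList k false i m →
            (m : Int) ≤ pvFindMaxLength '1' s.toList k) := pvFind_spec s.toList false k hl
      have hsing : ∃ (p : Bool) (i : Nat), pvFeas s.toList k p i 1 := by
        apply pvFeas_singleton s.toList k hl hpre
        by_cases hk0 : k = 0
        · subst hk0
          right
          by_contra hno
          push_neg at hno
          exact hnd ⟨rfl, hl, fun c hc => by have := hno c hc; tauto⟩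
        · exact Or.inl hk0
      obtain ⟨ps, is, hfs⟩ := hsing
      have halt1 : 1 ≤ longestAlternatingSubstring_alt s k := by
        have := haltub ps is 1 hfs
        simpa using this
      apply le_antisymm
      · apply max_le
        · rcases hsh0 with h1 | ⟨i, m, hf, hme⟩
          · rw [h1]; exact halt1
          · rw [hme]; exact haltub true i m hf
        · rcases hsh1 with h1 | ⟨i, m, hf, hme⟩
          · rw [h1]; exact halt1
          · rw [hme]; exact haltub false i m hf
      · have hf0ge : 1 ≤ pvFindMaxLength '0' s.toList k := by
          rcases hsh0 with h1 | ⟨i, m, hf, hme⟩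
          · omega
          · have := hf.2.1
            have : (1 : Int) ≤ ((m : Nat) : Int) := by exact_mod_cast this
            omega
        rcases haltshape with he | ⟨p, i, m, hf, hme⟩
        · calc longestAlternatingSubstring_alt s k = 0 := he
            _ ≤ pvFindMaxLength '0' s.toList k := by omega
            _ ≤ _ := le_max_left _ _
        · cases p
          · have := hub1 i m hf
            exact hme ▸ le_trans this (le_max_right _ _)
          · have := hub0 i m hf
            exact hme ▸ le_trans this (le_max_left _ _)
theorem pvMainD (s : String) (k : Int) (hk0 : k = 0) (hne : s.toList ≠ [])
    (hall : ∀ c ∈ s.toList, c ≠ '0' ∧ c ≠ '1') :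
    longestAlternatingSubstring s k = 1 ∧ longestAlternatingSubstring_alt s k = 0 := by
  subst hk0
  have hlen : 0 < s.toList.length := List.length_pos_iff.mpr hne
  have hlen' : (1 : Int) ≤ ((s.toList.length : Nat) : Int) := by exact_mod_cast hlen
  have hnof := pvNoFeas s.toList hall
  constructor
  · unfold longestAlternatingSubstring
    rw [if_neg hne, if_neg (by omega)]
    obtain ⟨hsh0, _⟩ : (pvFindMaxLength '0' s.toList 0 = 1 ∨
          ∃ i m : Nat, pvFeas s.toList 0 true i m ∧
            pvFindMaxLength '0' s.toList 0 = (m : Int)) ∧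
        (∀ i m : Nat, pvFeas s.toList 0 true i m →
          (m : Int) ≤ pvFindMaxLength '0' s.toList 0) := pvFind_spec s.toList true 0 hne
    obtain ⟨hsh1, _⟩ : (pvFindMaxLength '1' s.toList 0 = 1 ∨
          ∃ i m : Nat, pvFeas s.toList 0 false i m ∧
            pvFindMaxLength '1' s.toList 0 = (m : Int)) ∧
        (∀ i m : Nat, pvFeas s.toList 0 false i m →
          (m : Int) ≤ pvFindMaxLength '1' s.toList 0) := pvFind_spec s.toList false 0 hne
    have h0 : pvFindMaxLength '0' s.toList 0 = 1 := by
      rcases hsh0 with h | ⟨i, m, hf, _⟩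
      · exact h
      · exact absurd hf (hnof true i m)
    have h1 : pvFindMaxLength '1' s.toList 0 = 1 := by
      rcases hsh1 with h | ⟨i, m, hf, _⟩
      · exact h
      · exact absurd hf (hnof false i m)
    rw [h0, h1]; norm_num
  · obtain ⟨_, hshape, _⟩ := pvAlt_spec s 0
    rcases hshape with he | ⟨p, i, m, hf, _⟩
    · exact he
    · exact absurd hf (hnof p i m)

-- ===== VERDICT (by name: the statement is the Claim_ definition above) =====
theorem longestAlternatingSubstring_spec : Claim_unchanged_longestAlternatingSubstring := by
  intro s k _ hpre
  unfold Spec_longestAlternatingSubstring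
  intro hnd
  exact pvMainEq s k hpre hnd

set_option maxRecDepth 8192 in
theorem longestAlternatingSubstring_changed : Claim_changed_longestAlternatingSubstring := by
  unfold Claim_changed_longestAlternatingSubstring
  have hall : ∀ c ∈ "x".toList, c ≠ '0' ∧ c ≠ '1' := by
    intro c hc
    have h : c = 'x' := by
      have hx : "x".toList = ['x'] := rfl
      rw [hx] at hc
      simpa using hc
    subst h
    exact ⟨by decide, by decide⟩
  obtain ⟨h1, h0⟩ := pvMainD "x" 0 rfl (by decide) hall
  exact ⟨by decide, by decide, ⟨rfl, by decide, hall⟩, h1, h0, by decide⟩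

theorem longestAlternatingSubstring_tight : Claim_exact_longestAlternatingSubstring := by
  intro s k _ _ hd
  have hd' : k = 0 ∧ s.toList ≠ [] ∧ ∀ c ∈ s.toList, c ≠ '0' ∧ c ≠ '1' := hd
  obtain ⟨h1, h0⟩ := pvMainD s k hd'.1 hd'.2.1 hd'.2.2
  rw [h1, h0]
  norm_num
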